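-- pv_equiv track=rewrite | github.com/SMD-Bioinformatics-Lund/gens | gens/load/annotations.py | _is_metadata_row
-- ===== SOURCE A (Python) =====
-- def _is_metadata_row(line: str) -> bool:
--     """Check if a ChAS header row contains metadata definition.
--
--     The first three columns in a ChaS metadata row are empty.
--     """
--     row = line.rstrip().split("\t")
--     indent_len = 0
--     for col in row:
--         if col == "":
--             indent_len += 1
--         else:
--             break
--     return indent_len == 3
-- ===== SOURCE B (Python) =====
-- def _is_metadata_row(line: str) -> bool:
--     """Check if a ChAS header row contains metadata definition.
--
--     B: test the tab-prefix of the rstripped line directly instead of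
--     splitting into columns and counting leading empties.
--     """
--     s = line.rstrip()
--     return s.startswith("\t\t\t") and not s.startswith("\t\t\t\t")
-- ===== Notes on version B (the rewrite author's own statement) =====
-- stated objective: idiomatic
-- what changed: B replaces the split-into-columns pass and the counting loop over columns by a direct fixed-pattern prefix test on the rstripped string (exactly three leading tabs).
import Mathlib
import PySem

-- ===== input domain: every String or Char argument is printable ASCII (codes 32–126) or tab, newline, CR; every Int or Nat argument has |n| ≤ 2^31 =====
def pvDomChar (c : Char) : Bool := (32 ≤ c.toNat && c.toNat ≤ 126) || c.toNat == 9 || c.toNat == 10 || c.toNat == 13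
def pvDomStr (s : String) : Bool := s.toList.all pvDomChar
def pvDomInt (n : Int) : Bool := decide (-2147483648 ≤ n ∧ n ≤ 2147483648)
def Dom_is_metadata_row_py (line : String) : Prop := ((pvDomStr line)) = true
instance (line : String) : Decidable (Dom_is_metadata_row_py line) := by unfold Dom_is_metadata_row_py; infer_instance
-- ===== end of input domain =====

-- B replaces A's split-into-columns + leading-empty-counting loop by a direct
-- fixed-pattern prefix test on the rstripped string (idiomatic; same O(n) cost).


-- ===== PORT A =====
-- the 'for col in row: if col == "": indent_len += 1 else: break' loop, on the
-- List Char columns ('' is []); acc is indent_len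
def pvIndentLen : Nat → List (List Char) → Nat
  | acc, [] => acc
  | acc, col :: rest => if col = [] then pvIndentLen (acc + 1) rest else acc

-- row = line.rstrip().split("\t"); sep "\t" ≠ "" so PySem.Chars.splitOn is exact here
def is_metadata_row_py (line : String) : Bool :=
  let row := PySem.Chars.splitOn (PySem.Chars.rstrip line.toList) "\t".toList
  pvIndentLen 0 row == 3

-- ===== PORT B =====
def is_metadata_row_py_alt (line : String) : Bool :=
  let s := PySem.Str.rstrip line
  PySem.Str.startswith s "\t\t\t" && !(PySem.Str.startswith s "\t\t\t\t")

-- ===== PRECONDITION & SPEC =====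
def Spec_is_metadata_row_py (line : String) (out : Bool) : Prop := out = is_metadata_row_py_alt line
instance (line : String) (out : Bool) : Decidable (Spec_is_metadata_row_py line out) := by unfold Spec_is_metadata_row_py; infer_instance

-- ===== CLAIM (what is proved, stated in full; the proofs are below) =====
def Claim_equal_is_metadata_row_py : Prop := ∀ (line : String), Dom_is_metadata_row_py line → Spec_is_metadata_row_py line (is_metadata_row_py line)

-- ===== LEMMAS AND PROOFS =====

-- clean structural recursion equal to PySem.Chars.splitOn · ['\t']
def splitTab : List Char → List (List Char)
  | [] => [[]]
  | c :: cs =>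
    if c = '\t' then [] :: splitTab cs
    else
      match splitTab cs with
      | [] => [[c]]
      | h :: t => (c :: h) :: t

theorem splitTab_ne_nil (cs : List Char) : splitTab cs ≠ [] := by
  cases cs with
  | nil => simp [splitTab]
  | cons c cs =>
    simp only [splitTab]
    split
    · simp
    · split <;> simp_all

theorem splitOn_go_eq (cs : List Char) : ∀ (fuel : Nat) (cur : List Char)
    (acc : List (List Char)), cs.length < fuel →
    PySem.Chars.splitOn.go ['\t'] fuel cs cur acc
      = acc.reverse ++ (splitTab cs).modifyHead (cur.reverse ++ ·) := by
  induction cs with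
  | nil =>
    intro fuel cur acc hf
    cases fuel with
    | zero => omega
    | succ f => simp [PySem.Chars.splitOn.go, splitTab]
  | cons c rest ih =>
    intro fuel cur acc hf
    cases fuel with
    | zero => omega
    | succ f =>
      by_cases hc : c = '\t'
      · subst hc
        have hpre : List.isPrefixOf ['\t'] ('\t' :: rest) = true := by
          simp [List.isPrefixOf]
        rw [PySem.Chars.splitOn.go]
        simp only [hpre, if_pos, List.length_nil, List.length_cons, List.drop_zero,
          List.drop_succ_cons]
        rw [ih f [] (cur.reverse :: acc) (by simp at hf; omega)]
        rcases h : splitTab rest with _ | ⟨hd, tl⟩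
        · exact absurd h (splitTab_ne_nil rest)
        · simp [splitTab, h]
      · have hpre : List.isPrefixOf ['\t'] (c :: rest) = false := by
          simp only [List.isPrefixOf, Bool.and_eq_false_iff, beq_eq_false_iff_ne]
          exact Or.inl (Ne.symm hc)
        rw [PySem.Chars.splitOn.go]
        simp only [hpre]
        rw [if_neg (by simp)]
        rw [ih f (c :: cur) acc (by simp at hf; omega)]
        simp only [splitTab, if_neg hc]
        rcases h : splitTab rest with _ | ⟨hd, tl⟩
        · exact absurd h (splitTab_ne_nil rest)
        · simp

theorem splitOn_eq_splitTab (cs : List Char) :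
    PySem.Chars.splitOn cs ['\t'] = splitTab cs := by
  rw [PySem.Chars.splitOn, splitOn_go_eq cs (cs.length + 1) [] [] (by omega)]
  rcases h : splitTab cs with _ | ⟨hd, tl⟩
  · exact absurd h (splitTab_ne_nil cs)
  · simp

theorem le_pvIndentLen (l : List (List Char)) : ∀ acc : Nat, acc ≤ pvIndentLen acc l := by
  induction l with
  | nil => intro acc; simp [pvIndentLen]
  | cons col rest ih =>
    intro acc
    simp only [pvIndentLen]
    split
    · exact le_trans (by omega) (ih (acc + 1))
    · exact le_refl _

theorem pvIndentLen_splitTab_head (c : Char) (hc : c ≠ '\t') (cs : List Char)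
    (acc : Nat) : pvIndentLen acc (splitTab (c :: cs)) = acc := by
  simp only [splitTab, if_neg hc]
  rcases h : splitTab cs with _ | ⟨hd, tl⟩
  · exact absurd h (splitTab_ne_nil cs)
  · simp [pvIndentLen]

theorem head?_dropWhile_not {p : Char → Bool} : ∀ (l : List Char) (c : Char),
    (l.dropWhile p).head? = some c → p c = false := by
  intro l
  induction l with
  | nil => intro c h; simp at h
  | cons x xs ih =>
    intro c h
    rw [List.dropWhile_cons] at h
    split at h
    · exact ih c h
    · simp at h
      subst h
      simp_all

-- rstrip never leaves a trailing whitespace character (in particular no trailing tab)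
theorem rstrip_getLast?_not_space (s : List Char) (c : Char)
    (h : (PySem.Chars.rstrip s).getLast? = some c) : PySem.Chars.isspace c = false := by
  rw [PySem.Chars.rstrip, List.getLast?_reverse] at h
  exact head?_dropWhile_not _ c h

-- the core fact, on the char level: for a string with no trailing tab, the leading
-- empty-column count of the tab-split equals 3 iff the string starts with exactly 3 tabs
theorem sw_cons (x p : Char) (xs ps : List Char) :
    PySem.Chars.startswith (x :: xs) (p :: ps)
      = (p == x && PySem.Chars.startswith xs ps) := rfl

theorem sw_nil (s : List Char) : PySem.Chars.startswith s [] = true := by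
  cases s <;> rfl

theorem sw_nil_cons (p : Char) (ps : List Char) :
    PySem.Chars.startswith [] (p :: ps) = false := rfl

theorem splitTab_tab_cons (l : List Char) : splitTab ('\t' :: l) = [] :: splitTab l := by
  simp [splitTab]

theorem pvIndentLen_nil_cons (acc : Nat) (l : List (List Char)) :
    pvIndentLen acc ([] :: l) = pvIndentLen (acc + 1) l := by
  simp [pvIndentLen]

-- the core fact, on the char level: for a string with no trailing tab, the leading
-- empty-column count of the tab-split equals 3 iff the string starts with exactly 3 tabs
theorem core (cs : List Char)
    (hlast : ∀ c, cs.getLast? = some c → c ≠ '\t') :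
    (pvIndentLen 0 (splitTab cs) == 3)
      = (PySem.Chars.startswith cs ['\t', '\t', '\t']
          && !PySem.Chars.startswith cs ['\t', '\t', '\t', '\t']) := by
  rcases cs with _ | ⟨a, cs⟩
  · simp [splitTab, pvIndentLen, sw_nil_cons]
  by_cases ha : a = '\t'
  swap
  · rw [pvIndentLen_splitTab_head a ha]
    simp [sw_cons, beq_iff_eq, Ne.symm ha]
  subst ha
  rcases cs with _ | ⟨b, cs⟩
  · exact absurd rfl (hlast '\t' (by simp))
  by_cases hb : b = '\t'
  swap
  · rw [splitTab_tab_cons, pvIndentLen_nil_cons, pvIndentLen_splitTab_head b hb]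
    simp [sw_cons, beq_iff_eq, Ne.symm hb]
  subst hb
  rcases cs with _ | ⟨c, cs⟩
  · exact absurd rfl (hlast '\t' (by simp))
  by_cases hc : c = '\t'
  swap
  · rw [splitTab_tab_cons, splitTab_tab_cons, pvIndentLen_nil_cons,
      pvIndentLen_nil_cons, pvIndentLen_splitTab_head c hc]
    simp [sw_cons, beq_iff_eq, Ne.symm hc]
  subst hc
  rcases cs with _ | ⟨d, cs⟩
  · exact absurd rfl (hlast '\t' (by simp))
  by_cases hd : d = '\t'
  swap
  · rw [splitTab_tab_cons, splitTab_tab_cons, splitTab_tab_cons, pvIndentLen_nil_cons,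
      pvIndentLen_nil_cons, pvIndentLen_nil_cons, pvIndentLen_splitTab_head d hd]
    simp [sw_cons, sw_nil, Ne.symm hd]
  subst hd
  -- four or more leading tabs: count is at least 4, and the 4-tab prefix test is true
  have h4 : 4 ≤ pvIndentLen 0 (splitTab ('\t' :: '\t' :: '\t' :: '\t' :: cs)) := by
    rw [splitTab_tab_cons, splitTab_tab_cons, splitTab_tab_cons, splitTab_tab_cons,
      pvIndentLen_nil_cons, pvIndentLen_nil_cons, pvIndentLen_nil_cons, pvIndentLen_nil_cons]
    exact le_pvIndentLen _ 4
  have hne : (pvIndentLen 0 (splitTab ('\t' :: '\t' :: '\t' :: '\t' :: cs)) == 3) = false := by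
    exact beq_eq_false_iff_ne.mpr (by omega)
  rw [hne]
  simp [sw_cons, sw_nil]

-- ===== VERDICT (by name: the statement is the Claim_ definition above) =====
theorem is_metadata_row_py_spec : Claim_equal_is_metadata_row_py := by
  intro line _
  unfold Spec_is_metadata_row_py is_metadata_row_py is_metadata_row_py_alt
  simp only [PySem.Str.startswith, PySem.Str.rstrip, String.toList_ofList]
  rw [show ("\t".toList) = ['\t'] from rfl, splitOn_eq_splitTab]
  rw [show ("\t\t\t".toList) = ['\t', '\t', '\t'] from rfl]
  rw [show ("\t\t\t\t".toList) = ['\t', '\t', '\t', '\t'] from rfl]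
  exact core _ (fun c h hc => by
    have := rstrip_getLast?_not_space line.toList c h
    subst hc
    exact absurd this (by decide))
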